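-- pv_equiv track=rewrite | github.com/LeeEunah/Assignments | Data Science/Apriori_association/apriori.py | generateC1
-- ===== SOURCE A (Python) =====
-- def generateC1(data):
--     C1 = []
--     for transaction in data:
--         for item in transaction:
--             item_set = set()
--             item_set.add(item)
--             if item_set not in C1: # no duplicate element
--                 C1.append(item_set)
--
--     return C1
-- ===== SOURCE B (Python) =====
-- def generateC1(data):
--     # select-and-filter: pull the first pending item, emit its singleton,
--     # and purge all its copies from the pending stream; repeat until empty.
--     pending = [item for transaction in data for item in transaction]
--     C1 = []
--     while pending:
--         head = pending[0]
--         C1.append({head})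
--         pending = [y for y in pending[1:] if y != head]
--     return C1
-- ===== Notes on version B (the rewrite author's own statement) =====
-- stated objective: alternative
-- what changed: Replaced A's accumulate-and-membership-scan of the growing result by a select-and-filter elimination over the flattened item stream: repeatedly emit the first pending item's singleton and purge all its copies from the stream, so no membership test against the output ever happens.
import Mathlib
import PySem

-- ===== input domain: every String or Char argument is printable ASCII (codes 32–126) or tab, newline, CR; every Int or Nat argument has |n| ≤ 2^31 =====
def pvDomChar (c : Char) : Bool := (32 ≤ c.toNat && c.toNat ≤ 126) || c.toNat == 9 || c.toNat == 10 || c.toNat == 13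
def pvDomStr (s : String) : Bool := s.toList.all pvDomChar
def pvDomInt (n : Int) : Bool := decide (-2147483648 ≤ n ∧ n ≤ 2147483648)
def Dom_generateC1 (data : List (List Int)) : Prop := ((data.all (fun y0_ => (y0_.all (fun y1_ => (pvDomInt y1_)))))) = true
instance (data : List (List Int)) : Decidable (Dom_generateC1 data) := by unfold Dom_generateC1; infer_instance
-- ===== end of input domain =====

-- B replaces A's accumulate-and-membership-scan by a select-and-filter elimination
-- over the flattened item stream (objective: alternative; similar cost).

-- ===== PORT A =====
def generateC1 (data : List (List Int)) : List (List Int) :=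
  data.foldl (fun C1 transaction =>
    transaction.foldl (fun C1 item =>
      let item_set := PySem.Set.add ([] : PySem.Set Int) item
      if item_set ∉ C1 then C1 ++ [item_set] else C1) C1) []

-- ===== PORT B =====
-- B's while loop: pending shrinks strictly (head removed, rest filtered), so it is
-- the following recursion on the pending list.
def pvSelectFilter : List Int → List (List Int)
  | [] => []
  | head :: rest => [head] :: pvSelectFilter (rest.filter (fun y => y ≠ head))
termination_by xs => xs.length
decreasing_by
  simpa using Nat.lt_succ_of_le ((List.length_filter_le _ _).trans (le_of_eq List.length_attach))

def generateC1_alt (data : List (List Int)) : List (List Int) :=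
  pvSelectFilter (data.flatMap id)

-- ===== PRECONDITION & SPEC =====
def Spec_generateC1 (data : List (List Int)) (out : List (List Int)) : Prop := out = generateC1_alt data
instance (data : List (List Int)) (out : List (List Int)) : Decidable (Spec_generateC1 data out) := by unfold Spec_generateC1; infer_instance

-- ===== CLAIM (what is proved, stated in full; the proofs are below) =====
def Claim_equal_generateC1 : Prop := ∀ (data : List (List Int)), Dom_generateC1 data → Spec_generateC1 data (generateC1 data)

-- ===== LEMMAS AND PROOFS =====

@[simp] theorem pvSelectFilter_nil : pvSelectFilter [] = [] := by
  rw [pvSelectFilter]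

theorem pvSelectFilter_cons (head : Int) (rest : List Int) :
    pvSelectFilter (head :: rest)
      = [head] :: pvSelectFilter (rest.filter (fun y => y ≠ head)) := by
  rw [pvSelectFilter]

-- A's step applied to a state that is a list of singletons acts like Set.add.
theorem aStep_map_singleton (s : PySem.Set Int) (x : Int) :
    (if [x] ∉ s.map (fun i => [i]) then s.map (fun i => [i]) ++ [[x]]
     else s.map (fun i => [i]))
      = (PySem.Set.add s x).map (fun i => [i]) := by
  rw [PySem.Set.add_eq_ite]
  by_cases h : x ∈ s
  · have hm : [x] ∈ s.map (fun i => [i]) := List.mem_map.mpr ⟨x, h, rfl⟩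
    simp [hm, h]
  · have hm : [x] ∉ s.map (fun i => [i]) := by
      intro hmem
      obtain ⟨y, hy, he⟩ := List.mem_map.mp hmem
      cases he
      exact h hy
    simp [hm, h]

-- A's fold over a flat item list, started from a list-of-singletons state, is Set.update.
theorem aFold_map_singleton (xs : List Int) (s : PySem.Set Int) :
    xs.foldl (fun C1 item => if [item] ∉ C1 then C1 ++ [[item]] else C1)
      (s.map (fun i => [i]))
      = (PySem.Set.update s xs).map (fun i => [i]) := by
  induction xs generalizing s with
  | nil => simp [PySem.Set.update]
  | cons x xs ih =>
      rw [List.foldl_cons, aStep_map_singleton, ih, PySem.Set.update_cons]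

-- A's nested fold equals the same fold over the flattened data.
theorem aFold_flatten (data : List (List Int)) (init : List (List Int)) :
    data.foldl (fun C1 transaction =>
      transaction.foldl (fun C1 item => if [item] ∉ C1 then C1 ++ [[item]] else C1) C1) init
      = (data.flatMap id).foldl
          (fun C1 item => if [item] ∉ C1 then C1 ++ [[item]] else C1) init := by
  induction data generalizing init with
  | nil => rfl
  | cons t ts ih =>
      rw [List.foldl_cons, ih, List.flatMap_cons]
      simp only [id_eq]
      rw [List.foldl_append]

-- The mapped Set.update equals the select-and-filter recursion on the not-yet-seen items.
theorem update_eq_selectFilter (xs : List Int) (s : PySem.Set Int) :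
    (PySem.Set.update s xs).map (fun i => [i])
      = s.map (fun i => [i]) ++ pvSelectFilter (xs.filter (fun y => decide (y ∉ s))) := by
  induction xs generalizing s with
  | nil => simp [PySem.Set.update]
  | cons x xs ih =>
      rw [PySem.Set.update_cons, PySem.Set.add_eq_ite]
      by_cases h : x ∈ s
      · simp only [h, if_true]
        rw [ih]
        simp [h]
      · simp only [h, if_false]
        rw [ih]
        have hfilt : (xs.filter (fun y => decide (y ∉ s))).filter (fun y => decide (y ≠ x))
            = xs.filter (fun y => decide (y ∉ s ++ [x])) := by
          rw [List.filter_filter]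
          apply List.filter_congr
          intro a _
          by_cases ha : a ∈ s <;> by_cases hx : a = x <;> simp [ha, hx]
        simp only [h, not_false_iff, decide_true, List.filter_cons, if_true]
        rw [pvSelectFilter_cons, ← hfilt]
        simp

-- Mapping a trivially-true filter over the transactions is the identity.
theorem map_filter_true (l : List (List Int)) :
    List.map (List.filter fun (_ : Int) => true) l = l := by
  induction l with
  | nil => rfl
  | cons a t ih => simp only [List.map_cons, ih, List.filter_eq_self.mpr (fun _ _ => rfl)]

-- ===== VERDICT (by name: the statement is the Claim_ definition above) =====
theorem generateC1_spec : Claim_equal_generateC1 := by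
  intro data _
  show generateC1 data = generateC1_alt data
  simp only [generateC1, generateC1_alt, PySem.Set.add_eq_ite, List.not_mem_nil,
    List.nil_append, if_false]
  rw [aFold_flatten]
  have h := aFold_map_singleton (data.flatMap id) ([] : PySem.Set Int)
  simp only [List.map_nil] at h
  rw [h, update_eq_selectFilter]
  simp [map_filter_true]
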